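-- pv_equiv track=rewrite | github.com/FadeDrag0n/Python_Practice | Python_Practice/Async_Practice/generators/dragon_generator.py | battle_sequence
-- ===== SOURCE A (Python) =====
-- import itertools
--
-- def battle_sequence(dragons, enemies):
--     dragon_cycle = itertools.cycle(dragons)
--     enemy_names = list(enemies.keys())
--
--     while any(hp > 0 for hp in enemies.values()):
--         for enemy in enemy_names:
--             if enemies[enemy] <= 0:
--                 continue
--
--             dragon = next(dragon_cycle)
--
--             enemies[enemy] -= 40
--             if enemies[enemy] < 0:
--                 enemies[enemy] = 0
--
--             yield f"{dragon} attacks {enemy} (HP remains: {enemies[enemy]})"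
-- ===== SOURCE B (Python) =====
-- def battle_sequence(dragons, enemies):
--     # One pass per round over a shrinking list of live enemies; dead ones are
--     # dropped once instead of being rescanned every round.
--     active = [(name, hp) for name, hp in enemies.items() if hp > 0]
--     i = 0
--     while active:
--         nxt = []
--         for name, hp in active:
--             hp = max(hp - 40, 0)
--             enemies[name] = hp
--             yield f"{dragons[i % len(dragons)]} attacks {name} (HP remains: {hp})"
--             i += 1
--             if hp > 0:
--                 nxt.append((name, hp))
--         active = nxt
-- ===== Notes on version B (the rewrite author's own statement) =====
-- stated objective: alternative
-- what changed: B keeps a list of live enemies and drops each enemy the round it dies, instead of rescanning the full dict key list (including dead enemies) every round like A.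
import Mathlib
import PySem

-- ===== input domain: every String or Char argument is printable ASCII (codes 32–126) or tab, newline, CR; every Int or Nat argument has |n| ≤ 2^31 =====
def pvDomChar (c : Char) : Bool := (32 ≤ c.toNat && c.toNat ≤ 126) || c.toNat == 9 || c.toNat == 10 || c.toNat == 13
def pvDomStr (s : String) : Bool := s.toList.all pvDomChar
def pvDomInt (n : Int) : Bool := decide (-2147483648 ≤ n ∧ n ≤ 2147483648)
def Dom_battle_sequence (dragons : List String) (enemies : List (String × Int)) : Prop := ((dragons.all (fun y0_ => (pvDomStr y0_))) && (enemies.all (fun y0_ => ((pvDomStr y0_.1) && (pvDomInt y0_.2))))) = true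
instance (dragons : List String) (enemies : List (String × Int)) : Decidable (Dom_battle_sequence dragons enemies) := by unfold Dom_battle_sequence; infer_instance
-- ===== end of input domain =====

-- B removes dead enemies from the scan once instead of rescanning every round; A mutates the
-- enemies dict in place and B performs the same final mutation — the claim is about the yielded messages.

-- ===== PORT A =====
-- the inner `for enemy in enemy_names:` loop of one pass of the while loop;
-- returns the updated dict, the advanced dragon-cycle index, and the yielded messages
def battleRoundA (dragons : List String) (names : List String)
    (d : PySem.Dict String Int) (i : Nat) :
    PySem.Dict String Int × Nat × List String :=
  match names with
  | [] => (d, i, [])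
  | name :: rest =>
    let hp := d.getD name 0
    if hp ≤ 0 then battleRoundA dragons rest d i
    else
      let dragon := dragons.getD (i % dragons.length) ""   -- next(dragon_cycle)
      let hp1 := hp - 40
      let hp2 := if hp1 < 0 then 0 else hp1
      let d' := d.insert name hp2
      let msg := dragon ++ " attacks " ++ name ++ " (HP remains: " ++ PySem.Int.toStr hp2 ++ ")"
      let r := battleRoundA dragons rest d' (i + 1)
      (r.1, r.2.1, msg :: r.2.2)

-- the `while any(hp > 0 ...)` loop; fuel only makes the recursion structural
-- (it is chosen large enough that the loop always exits by its own condition first)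
def battleLoopA (dragons : List String) (names : List String) :
    Nat → PySem.Dict String Int → Nat → List String
  | 0, _, _ => []
  | fuel + 1, d, i =>
    if d.values.any (fun hp => decide (0 < hp)) then
      let r := battleRoundA dragons names d i
      r.2.2 ++ battleLoopA dragons names fuel r.1 r.2.1
    else []

def battle_sequence (dragons : List String) (enemies : List (String × Int)) : List String :=
  let d := PySem.Dict.ofList enemies
  let names := d.keys
  battleLoopA dragons names (1 + (d.values.map Int.toNat).sum) d 0

-- ===== PORT B =====
-- the `for name, hp in active:` loop: returns the surviving enemies, the index, the messages
def battleRoundB (dragons : List String) (active : List (String × Int)) (i : Nat) :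
    List (String × Int) × Nat × List String :=
  match active with
  | [] => ([], i, [])
  | (name, hp) :: rest =>
    let hp' := max (hp - 40) 0
    let msg := dragons.getD (i % dragons.length) "" ++ " attacks " ++ name ++
               " (HP remains: " ++ PySem.Int.toStr hp' ++ ")"
    let r := battleRoundB dragons rest (i + 1)
    (if 0 < hp' then (name, hp') :: r.1 else r.1, r.2.1, msg :: r.2.2)

-- the `while active:` loop, with the same structural fuel
def battleLoopB (dragons : List String) :
    Nat → List (String × Int) → Nat → List String
  | 0, _, _ => []
  | fuel + 1, active, i =>
    if active.isEmpty then []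
    else
      let r := battleRoundB dragons active i
      r.2.2 ++ battleLoopB dragons fuel r.1 r.2.1

def battle_sequence_alt (dragons : List String) (enemies : List (String × Int)) : List String :=
  let active := (PySem.Dict.ofList enemies).items.filter (fun p => decide (0 < p.2))
  battleLoopB dragons (1 + (active.map (fun p => p.2.toNat)).sum) active 0

-- ===== PRECONDITION & SPEC =====
-- A raises RuntimeError (next on an exhausted cycle of an empty dragons list) as soon as some
-- enemy in the dict is alive; on those inputs B raises too (ZeroDivisionError), so they are excluded.
def Pre_battle_sequence (dragons : List String) (enemies : List (String × Int)) : Prop :=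
  dragons ≠ [] ∨ (PySem.Dict.ofList enemies).values.all (fun hp => decide (hp ≤ 0)) = true
instance (dragons : List String) (enemies : List (String × Int)) : Decidable (Pre_battle_sequence dragons enemies) := by unfold Pre_battle_sequence; infer_instance

def pvWitness_battle_sequence : List String × (List (String × Int)) :=
  (["Smaug"], [("orc", 50), ("goblin", 30)])

def Spec_battle_sequence (dragons : List String) (enemies : List (String × Int)) (out : List String) : Prop := out = battle_sequence_alt dragons enemies
instance (dragons : List String) (enemies : List (String × Int)) (out : List String) : Decidable (Spec_battle_sequence dragons enemies out) := by unfold Spec_battle_sequence; infer_instance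

-- ===== CLAIM (what is proved, stated in full; the proofs are below) =====
def Claim_equal_battle_sequence : Prop := ∀ (dragons : List String) (enemies : List (String × Int)), Dom_battle_sequence dragons enemies → Pre_battle_sequence dragons enemies → Spec_battle_sequence dragons enemies (battle_sequence dragons enemies)

-- ===== LEMMAS AND PROOFS =====

-- A's inner loop, re-expressed directly on the dict's items list (proof-only helper)
def roundItems (dragons : List String) (ps : List (String × Int)) (i : Nat) :
    List (String × Int) × Nat × List String :=
  match ps with
  | [] => ([], i, [])
  | (name, hp) :: rest =>
    if hp ≤ 0 then
      let r := roundItems dragons rest i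
      ((name, hp) :: r.1, r.2.1, r.2.2)
    else
      let hp1 := hp - 40
      let hp2 := if hp1 < 0 then 0 else hp1
      let msg := dragons.getD (i % dragons.length) "" ++ " attacks " ++ name ++
                 " (HP remains: " ++ PySem.Int.toStr hp2 ++ ")"
      let r := roundItems dragons rest (i + 1)
      ((name, hp2) :: r.1, r.2.1, msg :: r.2.2)

lemma roundItems_fst_map (dragons : List String) (ps : List (String × Int)) (i : Nat) :
    (roundItems dragons ps i).1.map Prod.fst = ps.map Prod.fst := by
  induction ps generalizing i with
  | nil => rfl
  | cons p rest ih =>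
    obtain ⟨name, hp⟩ := p
    simp only [roundItems]
    split_ifs <;> simp [ih]

lemma sum_toNat_filter (l : List (String × Int)) :
    ((l.filter (fun p => decide (0 < p.2))).map (fun p => p.2.toNat)).sum
      = (l.map (fun p => p.2.toNat)).sum := by
  induction l with
  | nil => rfl
  | cons p rest ih =>
    by_cases h : 0 < p.2
    · simp [h, ih]
    · have : p.2.toNat = 0 := by omega
      simp [h, ih, this]

lemma insert_mid (pre tail : List (String × Int)) (name : String) (hp hp2 : Int)
    (hnd : ((pre ++ (name, hp) :: tail).map Prod.fst).Nodup) :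
    (PySem.Dict.mk (pre ++ (name, hp) :: tail)).insert name hp2
      = PySem.Dict.mk (pre ++ (name, hp2) :: tail) := by
  apply PySem.Dict.ext
  have hc : (PySem.Dict.mk (pre ++ (name, hp) :: tail)).contains name = true := by
    rw [PySem.Dict.contains_iff_mem_keys]
    simp [PySem.Dict.keys]
  rw [PySem.Dict.items_insert_of_contains _ _ hc]
  simp only [List.map_append, List.map_cons, List.nodup_append, List.nodup_cons] at hnd
  obtain ⟨-, ⟨hname, -⟩, hdisj⟩ := hnd
  have hpre : ∀ p ∈ pre, (if (p.1 == name) = true then (name, hp2) else p) = p := by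
    intro p hp'
    have : p.1 ≠ name := fun h =>
      hdisj p.1 (List.mem_map_of_mem hp') name (by simp) h
    simp [this]
  have htail : ∀ p ∈ tail, (if (p.1 == name) = true then (name, hp2) else p) = p := by
    intro p hp'
    have : p.1 ≠ name := fun h => hname (h ▸ List.mem_map_of_mem hp')
    simp [this]
  show (pre ++ (name, hp) :: tail).map _ = pre ++ (name, hp2) :: tail
  rw [List.map_append, List.map_cons, List.map_congr_left hpre,
      List.map_congr_left htail]
  simp

lemma getD_mid (pre tail : List (String × Int)) (name : String) (hp : Int)
    (hnd : ((pre ++ (name, hp) :: tail).map Prod.fst).Nodup) :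
    (PySem.Dict.mk (pre ++ (name, hp) :: tail)).getD name 0 = hp := by
  exact PySem.Dict.getD_of_mem_items _ (by simp : (name, hp) ∈ pre ++ (name, hp) :: tail)
    (by simpa [PySem.Dict.keys] using hnd) 0

-- one pass of A's inner loop over the tail `qs` of the items list equals `roundItems` on `qs`,
-- with the already-processed prefix `pre` left in place
lemma roundA_eq_roundItems (dragons : List String) :
    ∀ (qs pre : List (String × Int)) (i : Nat),
    ((pre ++ qs).map Prod.fst).Nodup →
    battleRoundA dragons (qs.map Prod.fst) (PySem.Dict.mk (pre ++ qs)) i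
      = (PySem.Dict.mk (pre ++ (roundItems dragons qs i).1),
         (roundItems dragons qs i).2.1, (roundItems dragons qs i).2.2) := by
  intro qs
  induction qs with
  | nil => intro pre i _; simp [battleRoundA, roundItems]
  | cons p rest ih =>
    intro pre i hnd
    obtain ⟨name, hp⟩ := p
    have hget := getD_mid pre rest name hp hnd
    simp only [List.map_cons, battleRoundA, roundItems, hget]
    by_cases hle : hp ≤ 0
    · simp only [if_pos hle]
      have : pre ++ (name, hp) :: rest = (pre ++ [(name, hp)]) ++ rest := by simp
      rw [this] at hnd ⊢
      rw [ih (pre ++ [(name, hp)]) i hnd]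
      simp
    · simp only [if_neg hle]
      rw [insert_mid pre rest name hp _ hnd]
      have hnd2 : (((pre ++ [(name, if hp - 40 < 0 then 0 else hp - 40)]) ++ rest).map Prod.fst).Nodup := by
        simpa using hnd
      have := ih (pre ++ [(name, if hp - 40 < 0 then 0 else hp - 40)]) (i + 1) hnd2
      simp only [List.append_assoc, List.cons_append, List.nil_append] at this
      rw [this]

-- `roundItems` agrees with B's round on the live sublist
lemma roundItems_eq_roundB (dragons : List String) :
    ∀ (qs : List (String × Int)) (i : Nat),
    battleRoundB dragons (qs.filter (fun p => decide (0 < p.2))) i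
      = ((roundItems dragons qs i).1.filter (fun p => decide (0 < p.2)),
         (roundItems dragons qs i).2.1, (roundItems dragons qs i).2.2) := by
  intro qs
  induction qs with
  | nil => intro i; simp [battleRoundB, roundItems]
  | cons p rest ih =>
    intro i
    obtain ⟨name, hp⟩ := p
    by_cases hle : hp ≤ 0
    · have h0 : ¬ (0 < hp) := by omega
      simp only [roundItems, if_pos hle, List.filter_cons, decide_eq_true_eq, if_neg h0, ih i]
    · have h0 : (0 < hp) := by omega
      have hmax : max (hp - 40) 0 = if hp - 40 < 0 then 0 else hp - 40 := by omega
      simp only [roundItems, if_neg hle, List.filter_cons, decide_eq_true_eq, if_pos h0,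
        battleRoundB, hmax, ih (i + 1)]

-- the two while-loops agree, round by round, under the invariant
-- `active = live items of the dict` (same fuel on both sides)
lemma any_pos_eq (l : List (String × Int)) :
    ((l.map Prod.snd).any (fun hp => decide (0 < hp)))
      = !(l.filter (fun p => decide (0 < p.2))).isEmpty := by
  induction l with
  | nil => rfl
  | cons p rest ih =>
    by_cases h : 0 < p.2 <;> simp [h, ih]

-- the two while-loops agree, round by round, under the invariant
-- `active = live items of the dict` (same fuel on both sides)
lemma loop_eq (dragons : List String) :
    ∀ (fuel : Nat) (l : List (String × Int)) (i : Nat),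
    (l.map Prod.fst).Nodup →
    battleLoopA dragons (l.map Prod.fst) fuel (PySem.Dict.mk l) i
      = battleLoopB dragons fuel (l.filter (fun p => decide (0 < p.2))) i := by
  intro fuel
  induction fuel with
  | zero => intro l i _; rfl
  | succ fuel ih =>
    intro l i hnd
    have hcond : ((PySem.Dict.mk l).values.any (fun hp => decide (0 < hp)))
        = !(l.filter (fun p => decide (0 < p.2))).isEmpty := by
      rw [PySem.Dict.values_mk]; exact any_pos_eq l
    simp only [battleLoopA, battleLoopB, hcond]
    by_cases he : (l.filter (fun p => decide (0 < p.2))).isEmpty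
    · simp [he]
    · rw [if_pos (by simp [he]), if_neg he]
      have hA := roundA_eq_roundItems dragons l [] i (by simpa using hnd)
      simp only [List.nil_append] at hA
      rw [hA, roundItems_eq_roundB dragons l i]
      simp only
      congr 1
      have hkeys := roundItems_fst_map dragons l i
      have hnd' : ((roundItems dragons l i).1.map Prod.fst).Nodup := by
        rw [hkeys]; exact hnd
      conv_lhs => rw [← hkeys]
      exact ih (roundItems dragons l i).1 (roundItems dragons l i).2.1 hnd'

-- ===== VERDICT (by name: the statement is the Claim_ definition above) =====
theorem battle_sequence_spec : Claim_equal_battle_sequence := by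
  intro dragons enemies _ _
  show battle_sequence dragons enemies = battle_sequence_alt dragons enemies
  unfold battle_sequence battle_sequence_alt
  set d := PySem.Dict.ofList enemies with hd
  have hmk : d = PySem.Dict.mk d.items := rfl
  have hnd : (d.items.map Prod.fst).Nodup := by
    have := PySem.Dict.nodup_keys_ofList (κ := String) (ν := Int) enemies
    simpa [PySem.Dict.keys, hd] using this
  have hkeys : d.keys = d.items.map Prod.fst := by simp [PySem.Dict.keys]
  have hvals : d.values = d.items.map Prod.snd := by simp [PySem.Dict.values]
  have hfuel : (d.values.map Int.toNat).sum
      = ((d.items.filter (fun p => decide (0 < p.2))).map (fun p => p.2.toNat)).sum := by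
    rw [sum_toNat_filter, hvals, List.map_map]; rfl
  simp only [hkeys, hfuel]
  rw [hmk]
  exact loop_eq dragons _ d.items 0 hnd
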